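-- pv_equiv track=rewrite | github.com/gitCode5345/Mariukhna_pythonCourse | Homework0/Task3.py | count_cols_zero_element
-- ===== SOURCE A (Python) =====
-- MATRIX_HEIGHT = 4
--
-- MATRIX_WIDTH = 3
--
-- def count_cols_zero_element(m):
--     counter = 0
--     for i in range(MATRIX_WIDTH):
--         for j in range(MATRIX_HEIGHT):
--             if m[j][i] == 0:
--                 counter = counter + 1
--                 break
--
--     return counter
-- ===== SOURCE B (Python) =====
-- MATRIX_HEIGHT = 4
--
-- MATRIX_WIDTH = 3
--
-- def count_cols_zero_element(m):
--     zero_cols = set()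
--     for j in range(MATRIX_HEIGHT):
--         for i in range(MATRIX_WIDTH):
--             if m[j][i] == 0:
--                 zero_cols.add(i)
--     return len(zero_cols)
-- ===== Notes on version B (the rewrite author's own statement) =====
-- stated objective: simpler
-- what changed: Replaces the column-major break-early scan that increments a counter with a single row-major pass accumulating the set of columns that contain a zero, returning its size.
-- outside the precondition, e.g. on count_cols_zero_element([[0, 0, 0]]): A returns 3, B raises IndexError
import Mathlib
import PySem

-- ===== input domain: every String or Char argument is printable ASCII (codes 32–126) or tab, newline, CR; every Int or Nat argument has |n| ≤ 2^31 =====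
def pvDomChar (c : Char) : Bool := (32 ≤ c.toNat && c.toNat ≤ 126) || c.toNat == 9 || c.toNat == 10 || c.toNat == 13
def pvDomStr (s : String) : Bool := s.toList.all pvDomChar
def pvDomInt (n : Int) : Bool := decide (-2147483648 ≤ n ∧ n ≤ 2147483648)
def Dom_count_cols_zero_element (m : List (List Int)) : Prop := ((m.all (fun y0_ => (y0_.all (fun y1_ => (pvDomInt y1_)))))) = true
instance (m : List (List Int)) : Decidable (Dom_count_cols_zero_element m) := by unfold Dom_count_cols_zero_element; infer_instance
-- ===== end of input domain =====

-- B replaces A's column-major break-early counting scan with one row-major pass that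
-- accumulates the set of columns containing a zero (objective: simpler).

-- ===== PORT A =====
-- inner 'for j in range(MATRIX_HEIGHT)' loop with break; out-of-range access raises in
-- Python (excluded by Pre_), here the pyGet? defaults keep the function total.
def aColScan (m : List (List Int)) (i : Int) : List Int → Int → Int
  | [], counter => counter
  | j :: rest, counter =>
    if ((PySem.List.pyGet? ((PySem.List.pyGet? m j).getD []) i).getD 1) == 0 then counter + 1
    else aColScan m i rest counter

def count_cols_zero_element (m : List (List Int)) : Int :=
  (PySem.List.pyRange 0 3 1).foldl (fun counter i => aColScan m i (PySem.List.pyRange 0 4 1) counter) 0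

-- ===== PORT B =====
def count_cols_zero_element_alt (m : List (List Int)) : Int :=
  ((PySem.List.pyRange 0 4 1).foldl (fun s j =>
      (PySem.List.pyRange 0 3 1).foldl (fun s i =>
        if ((PySem.List.pyGet? ((PySem.List.pyGet? m j).getD []) i).getD 1) == 0 then PySem.Set.add s i
        else s) s)
    (PySem.Set.empty : PySem.Set Int)).length

-- ===== PRECONDITION & SPEC =====
-- Pre_ excludes ragged/short matrices: on most of them Python A raises IndexError, and on the
-- few where A's early break accidentally avoids the out-of-range access (a zero in every
-- column's first rows) A's returning is an artefact of its scan order and B raises there.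
def Pre_count_cols_zero_element (m : List (List Int)) : Prop :=
  4 ≤ m.length ∧ ∀ r ∈ m.take 4, 3 ≤ r.length
instance (m : List (List Int)) : Decidable (Pre_count_cols_zero_element m) := by
  unfold Pre_count_cols_zero_element; infer_instance
def pvWitness_count_cols_zero_element : List (List Int) := [[1, 0, 3], [4, 5, 6], [7, 8, 0], [0, 1, 2]]

def Spec_count_cols_zero_element (m : List (List Int)) (out : Int) : Prop := out = count_cols_zero_element_alt m
instance (m : List (List Int)) (out : Int) : Decidable (Spec_count_cols_zero_element m out) := by unfold Spec_count_cols_zero_element; infer_instance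

-- ===== CLAIM (what is proved, stated in full; the proofs are below) =====
def Claim_equal_count_cols_zero_element : Prop := ∀ (m : List (List Int)), Dom_count_cols_zero_element m → Pre_count_cols_zero_element m → Spec_count_cols_zero_element m (count_cols_zero_element m)

-- ===== LEMMAS AND PROOFS =====

-- ===== VERDICT (by name: the statement is the Claim_ definition above) =====
theorem count_cols_zero_element_spec : Claim_equal_count_cols_zero_element := by
  intro m _ _
  unfold Spec_count_cols_zero_element count_cols_zero_element count_cols_zero_element_alt
  have h3 : PySem.List.pyRange 0 3 1 = [0, 1, 2] := by decide
  have h4 : PySem.List.pyRange 0 4 1 = [0, 1, 2, 3] := by decide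
  simp only [h3, h4, List.foldl, aColScan]
  generalize ((PySem.List.pyGet? ((PySem.List.pyGet? m 0).getD []) 0).getD 1 == 0) = b00
  generalize ((PySem.List.pyGet? ((PySem.List.pyGet? m 1).getD []) 0).getD 1 == 0) = b10
  generalize ((PySem.List.pyGet? ((PySem.List.pyGet? m 2).getD []) 0).getD 1 == 0) = b20
  generalize ((PySem.List.pyGet? ((PySem.List.pyGet? m 3).getD []) 0).getD 1 == 0) = b30
  generalize ((PySem.List.pyGet? ((PySem.List.pyGet? m 0).getD []) 1).getD 1 == 0) = b01
  generalize ((PySem.List.pyGet? ((PySem.List.pyGet? m 1).getD []) 1).getD 1 == 0) = b11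
  generalize ((PySem.List.pyGet? ((PySem.List.pyGet? m 2).getD []) 1).getD 1 == 0) = b21
  generalize ((PySem.List.pyGet? ((PySem.List.pyGet? m 3).getD []) 1).getD 1 == 0) = b31
  generalize ((PySem.List.pyGet? ((PySem.List.pyGet? m 0).getD []) 2).getD 1 == 0) = b02
  generalize ((PySem.List.pyGet? ((PySem.List.pyGet? m 1).getD []) 2).getD 1 == 0) = b12
  generalize ((PySem.List.pyGet? ((PySem.List.pyGet? m 2).getD []) 2).getD 1 == 0) = b22
  generalize ((PySem.List.pyGet? ((PySem.List.pyGet? m 3).getD []) 2).getD 1 == 0) = b32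
  revert b00 b10 b20 b30 b01 b11 b21 b31 b02 b12 b22 b32
  decide
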